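-- pv_equiv track=rewrite | github.com/Dacu02/Natural_Computation_Project | Algorithms/ParticleSwarmOptimization.py | best_rectangle
-- ===== SOURCE A (Python) =====
-- import math
--
-- def best_rectangle(n: int) -> tuple[int, int]: # type: ignore
--     """
--         Metodo statico per calcolare le dimensioni del rettangolo più vicino al quadrato per un dato numero di particelle.
--         Args:
--             n (int): Numero di particelle.
--         Returns:
--             tuple: Una tupla contenente le dimensioni (larghezza, altezza) del rettangolo.
--         Raises:
--             ValueError: Se n non è un intero positivo.
--     """
--     if n <= 0:
--         raise ValueError("n deve essere un intero positivo")
--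
--     root = int(math.isqrt(n))
--     for a in range(root, 0, -1):
--         if n % a == 0:
--             b = n // a
--             return a, b
-- ===== SOURCE B (Python) =====
-- import math
--
-- def best_rectangle(n: int) -> tuple[int, int]:
--     if n <= 0:
--         raise ValueError("n deve essere un intero positivo")
--     # prime-factorize n by trial division
--     factors = []
--     m = n
--     p = 2
--     while p * p <= m:
--         if m % p == 0:
--             e = 0
--             while m % p == 0:
--                 m //= p
--                 e += 1
--             factors.append((p, e))
--         p += 1
--     if m > 1:
--         factors.append((m, 1))
--     # enumerate all divisors of n from the factorization
--     divs = [1]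
--     for (p, e) in factors:
--         divs = [d * p ** k for d in divs for k in range(e + 1)]
--     root = math.isqrt(n)
--     best = max(d for d in divs if d <= root)
--     return best, n // best
-- ===== Notes on version B (the rewrite author's own statement) =====
-- stated objective: alternative
-- what changed: A trial-divides downward from isqrt(n) and early-returns at the first divisor; B instead prime-factorizes n by trial division, enumerates all divisors from the factorization, and takes the largest divisor <= isqrt(n).
import Mathlib
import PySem

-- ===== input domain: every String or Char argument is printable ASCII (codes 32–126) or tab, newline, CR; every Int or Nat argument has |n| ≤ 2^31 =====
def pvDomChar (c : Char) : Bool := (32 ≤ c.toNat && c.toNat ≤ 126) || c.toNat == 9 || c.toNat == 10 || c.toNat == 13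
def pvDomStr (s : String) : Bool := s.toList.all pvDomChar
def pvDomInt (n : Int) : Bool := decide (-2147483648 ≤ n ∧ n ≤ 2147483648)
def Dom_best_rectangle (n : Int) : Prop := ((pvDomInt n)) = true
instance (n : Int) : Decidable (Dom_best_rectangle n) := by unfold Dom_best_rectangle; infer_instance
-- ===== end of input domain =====

-- B replaces A's downward trial-division scan by a different algorithm: prime-factorize n,
-- enumerate ALL divisors from the factorization, and take the largest one ≤ isqrt(n)
-- (alternative algorithm, same worst-case cost; return value only).

-- ===== PORT A =====
-- A's loop 'for a in range(root, 0, -1): if n % a == 0: return a, n // a',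
-- recursing downward on the counter; the 0 case is Python's implicit fall-off
-- (unreachable for n ≥ 1, excluded by Pre_ otherwise).
def bestRectDown (n : Int) : Nat → Int × Int
  | 0 => (0, 0)
  | a + 1 =>
      if PySem.Int.mod n ((a + 1 : Nat) : Int) = 0 then
        (((a + 1 : Nat) : Int), PySem.Int.floordiv n ((a + 1 : Nat) : Int))
      else bestRectDown n a

def best_rectangle (n : Int) : Int × Int :=
  if n ≤ 0 then (0, 0)  -- Python raises ValueError here (outside Pre_)
  else bestRectDown n (Nat.sqrt n.toNat)

-- ===== PORT B =====
-- All values below are positive Python ints, so Nat's `%`, `/`, `^` are the exact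
-- images of Python's `%`, `//`, `**` here.

-- inner loop 'while m % p == 0: m //= p; e += 1' (the 2 ≤ p / 0 < m guard conjuncts
-- only make the recursion total; at every actual call p ≥ 2 and m ≥ 1 hold)
def divideOut (m p e : Nat) : Nat × Nat :=
  if h : 2 ≤ p ∧ 0 < m ∧ m % p = 0 then divideOut (m / p) p (e + 1) else (m, e)
termination_by m
decreasing_by exact Nat.div_lt_self h.2.1 (by omega)

-- the port (factorLoop) needs this bound for termination, so it stays above the claim
theorem divideOut_fst_le (m p e : Nat) : (divideOut m p e).1 ≤ m := by
  induction m using Nat.strong_induction_on generalizing e with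
  | _ m ih =>
      rw [divideOut]
      by_cases h : 2 ≤ p ∧ 0 < m ∧ m % p = 0
      · rw [dif_pos h]
        exact le_trans (ih _ (Nat.div_lt_self h.2.1 (by omega)) _) (Nat.div_le_self m p)
      · rw [dif_neg h]

-- outer loop 'while p * p <= m: if m % p == 0: …divide out, record (p, e)…; p += 1';
-- returns (factors, final m)
def factorLoop (m p : Nat) : List (Nat × Nat) × Nat :=
  if h : p * p ≤ m then
    if m % p = 0 then
      let me := divideOut m p 0
      let rest := factorLoop me.1 (p + 1)
      ((p, me.2) :: rest.1, rest.2)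
    else factorLoop m (p + 1)
  else ([], m)
termination_by m + 1 - p
decreasing_by
  · have h1 := divideOut_fst_le m p 0
    have h2 : p ≤ m := by nlinarith
    omega
  · have h2 : p ≤ m := by nlinarith
    omega

-- one step 'divs = [d * p**k for d in divs for k in range(e + 1)]'
def divsStep (divs : List Nat) (pe : Nat × Nat) : List Nat :=
  divs.flatMap (fun d => (List.range (pe.2 + 1)).map (fun k => d * pe.1 ^ k))

def best_rectangle_alt (n : Int) : Int × Int :=
  if n ≤ 0 then (0, 0)  -- Python raises ValueError here (outside Pre_)
  else
    let nn := n.toNat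
    let fm := factorLoop nn 2
    let factors := if fm.2 > 1 then fm.1 ++ [(fm.2, 1)] else fm.1
    let divs := factors.foldl divsStep [1]
    let root := Nat.sqrt nn
    -- 'max(d for d in divs if d <= root)' as the running-max loop; the generator is
    -- never empty (1 is always kept), so the 0 seed is never the result
    let best := (divs.filter (fun d => d ≤ root)).foldl max 0
    ((best : Int), ((nn / best : Nat) : Int))

-- ===== PRECONDITION & SPEC =====
-- Pre_ excludes exactly n ≤ 0, where the Python A raises ValueError.
def Pre_best_rectangle (n : Int) : Prop := 1 ≤ n
instance (n : Int) : Decidable (Pre_best_rectangle n) := by unfold Pre_best_rectangle; infer_instance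
def pvWitness_best_rectangle : Int := 12

def Spec_best_rectangle (n : Int) (out : Int × Int) : Prop := out = best_rectangle_alt n
instance (n : Int) (out : Int × Int) : Decidable (Spec_best_rectangle n out) := by unfold Spec_best_rectangle; infer_instance

-- ===== CLAIM (what is proved, stated in full; the proofs are below) =====
def Claim_equal_best_rectangle : Prop := ∀ (n : Int), Dom_best_rectangle n → Pre_best_rectangle n → Spec_best_rectangle n (best_rectangle n)

-- ===== LEMMAS AND PROOFS =====

-- product of the factorization list
def prodFac (L : List (Nat × Nat)) : Nat := (L.map (fun pe => pe.1 ^ pe.2)).prod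

-- A's downward early-return scan returns the greatest divisor ≤ r (with its cofactor)
theorem bestRectDown_eq (n : Int) (hn : 0 < n) (r g : Nat)
    (hg1 : 1 ≤ g) (hgr : g ≤ r) (hgd : g ∣ n.toNat)
    (hmax : ∀ c, c ∣ n.toNat → c ≤ r → c ≤ g) :
    bestRectDown n r = ((g : Int), ((n.toNat / g : Nat) : Int)) := by
  have hcast : n = ((n.toNat : Nat) : Int) := (Int.toNat_of_nonneg (le_of_lt hn)).symm
  induction r with
  | zero => omega
  | succ a ih =>
      have hdvd_iff : PySem.Int.mod n ((a + 1 : Nat) : Int) = 0 ↔ (a + 1) ∣ n.toNat := by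
        rw [PySem.Int.mod_eq_zero_iff_dvd, hcast]
        exact Int.natCast_dvd_natCast
      by_cases hd : (a + 1) ∣ n.toNat
      · have hga : g = a + 1 := le_antisymm hgr (hmax (a + 1) hd le_rfl)
        subst hga
        simp only [bestRectDown, if_pos (hdvd_iff.mpr hd)]
        rw [hcast, PySem.Int.floordiv_natCast]
        simp
      · have hga : g ≤ a := by
          by_contra hc
          exact hd (by rwa [show g = a + 1 by omega] at hgd)
        simp only [bestRectDown, if_neg (fun h => hd (hdvd_iff.mp h))]
        exact ih hga (fun c hc hcr => hmax c hc (Nat.le_succ_of_le hcr))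

theorem divideOut_spec (m : Nat) (hm : 0 < m) (p e : Nat) (hp : 2 ≤ p) :
    (divideOut m p e).1 * p ^ ((divideOut m p e).2 - e) = m ∧
    e ≤ (divideOut m p e).2 ∧ 0 < (divideOut m p e).1 ∧ ¬ p ∣ (divideOut m p e).1 := by
  induction m using Nat.strong_induction_on generalizing e with
  | _ m ih =>
      rw [divideOut]
      by_cases h : p ∣ m
      · have hcond : 2 ≤ p ∧ 0 < m ∧ m % p = 0 := ⟨hp, hm, Nat.dvd_iff_mod_eq_zero.mp h⟩
        rw [dif_pos hcond]
        have hlt : m / p < m := Nat.div_lt_self hm (by omega)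
        have hmp : 0 < m / p := Nat.div_pos (Nat.le_of_dvd hm h) (by omega)
        obtain ⟨h1, h2, h3, h4⟩ := ih (m / p) hlt hmp (e + 1)
        refine ⟨?_, by omega, h3, h4⟩
        have hexp : (divideOut (m / p) p (e + 1)).2 - e = ((divideOut (m / p) p (e + 1)).2 - (e + 1)) + 1 := by omega
        rw [hexp, pow_succ, ← mul_assoc, h1, Nat.div_mul_cancel h]
      · have hcond : ¬ (2 ≤ p ∧ 0 < m ∧ m % p = 0) := by
          rintro ⟨-, -, hmod⟩
          exact h (Nat.dvd_iff_mod_eq_zero.mpr hmod)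
        rw [dif_neg hcond]
        exact ⟨by simp, le_rfl, hm, h⟩

theorem factorLoop_spec (m p : Nat) : 0 < m → 2 ≤ p →
    (∀ q, 2 ≤ q → q < p → ¬ q ∣ m) →
    prodFac (factorLoop m p).1 * (factorLoop m p).2 = m ∧
    (∀ pe ∈ (factorLoop m p).1, Nat.Prime pe.1 ∧ p ≤ pe.1) ∧
    (factorLoop m p).1.Pairwise (fun a b => a.1 < b.1) ∧
    ((factorLoop m p).2 = 1 ∨
      (Nat.Prime (factorLoop m p).2 ∧ ∀ pe ∈ (factorLoop m p).1, pe.1 < (factorLoop m p).2)) := by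
  induction m, p using factorLoop.induct with
  | case1 m p h hmod me ih =>
      intro hm hp hsmall
      rw [factorLoop]
      simp only [dif_pos h, if_pos hmod]
      simp only [show me = divideOut m p 0 from rfl] at ih
      have hpdvd : p ∣ m := Nat.dvd_iff_mod_eq_zero.mpr hmod
      obtain ⟨hd1, -, hm', hnp⟩ := divideOut_spec m hm p 0 hp
      rw [Nat.sub_zero] at hd1
      have hm'dvd : (divideOut m p 0).1 ∣ m := ⟨p ^ (divideOut m p 0).2, hd1.symm⟩
      have hsmall' : ∀ q, 2 ≤ q → q < p + 1 → ¬ q ∣ (divideOut m p 0).1 := by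
        intro q h2 hlt hdv
        by_cases hq : q = p
        · exact hnp (hq ▸ hdv)
        · exact hsmall q h2 (by omega) (hdv.trans hm'dvd)
      obtain ⟨ihprod, ihmem, ihpw, ihmf⟩ := ih hm' (by omega) hsmall'
      have hp_prime : Nat.Prime p := by
        rw [Nat.prime_def_lt]
        refine ⟨hp, fun q hqp hq => ?_⟩
        by_contra hq1
        have hq0 : q ≠ 0 := by rintro rfl; simp at hq; omega
        exact hsmall q (by omega) hqp (hq.trans hpdvd)
      refine ⟨?_, ?_, ?_, ?_⟩
      · have hcons : prodFac ((p, (divideOut m p 0).2) :: (factorLoop (divideOut m p 0).1 (p + 1)).1)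
            = p ^ (divideOut m p 0).2 * prodFac (factorLoop (divideOut m p 0).1 (p + 1)).1 := by
          simp [prodFac]
        show prodFac _ * _ = m
        rw [hcons, mul_assoc, ihprod, mul_comm, hd1]
      · intro pe hpe
        rcases List.mem_cons.mp hpe with rfl | hpe
        · exact ⟨hp_prime, le_rfl⟩
        · exact ⟨(ihmem pe hpe).1, by have := (ihmem pe hpe).2; omega⟩
      · exact List.pairwise_cons.mpr
          ⟨fun b hb => by have := (ihmem b hb).2; omega, ihpw⟩
      · rcases ihmf with h1 | ⟨hpr, hlt⟩
        · exact Or.inl h1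
        · refine Or.inr ⟨hpr, fun pe hpe => ?_⟩
          rcases List.mem_cons.mp hpe with rfl | hpe
          · show p < _
            have hmfdvd : (factorLoop (divideOut m p 0).1 (p + 1)).2 ∣ (divideOut m p 0).1 :=
              Dvd.intro_left _ ihprod
            by_contra hle
            exact hsmall' _ hpr.two_le (by omega) hmfdvd
          · exact hlt pe hpe
  | case2 m p h hmod ih =>
      intro hm hp hsmall
      rw [factorLoop]
      simp only [dif_pos h, if_neg hmod]
      have hsmall' : ∀ q, 2 ≤ q → q < p + 1 → ¬ q ∣ m := by
        intro q h2 hlt hdv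
        by_cases hq : q = p
        · exact hmod (Nat.dvd_iff_mod_eq_zero.mp (hq ▸ hdv))
        · exact hsmall q h2 (by omega) hdv
      obtain ⟨ihprod, ihmem, ihpw, ihmf⟩ := ih hm (by omega) hsmall'
      exact ⟨ihprod, fun pe hpe => ⟨(ihmem pe hpe).1, by have := (ihmem pe hpe).2; omega⟩,
        ihpw, ihmf⟩
  | case3 m p h =>
      intro hm hp hsmall
      rw [factorLoop]
      simp only [dif_neg h]
      refine ⟨by simp [prodFac], by simp, by simp, ?_⟩
      by_cases hm1 : m = 1
      · exact Or.inl hm1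
      · refine Or.inr ⟨?_, by simp⟩
        by_contra hnpr
        have hqpr := Nat.minFac_prime hm1
        have hqd := Nat.minFac_dvd m
        have hq2 := hqpr.two_le
        have hpq : p ≤ m.minFac := by
          by_contra hlt
          exact hsmall m.minFac hq2 (by omega) hqd
        have hsq := Nat.minFac_sq_le_self hm hnpr
        nlinarith [hsq, hpq]

-- every positive d splits as p^k * d1 with p not dividing d1
theorem exists_pow_mul_not_dvd (p : Nat) (hp : 2 ≤ p) :
    ∀ d, 0 < d → ∃ k d1, d = p ^ k * d1 ∧ ¬ p ∣ d1 := by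
  intro d
  induction d using Nat.strong_induction_on with
  | _ d ih =>
      intro hd
      by_cases h : p ∣ d
      · obtain ⟨k, d1, h1, h2⟩ := ih (d / p) (Nat.div_lt_self hd (by omega))
          (Nat.div_pos (Nat.le_of_dvd hd h) (by omega))
        exact ⟨k + 1, d1, by
          rw [pow_succ, mul_comm (p ^ k) p, mul_assoc, ← h1, Nat.mul_div_cancel' h], h2⟩
      · exact ⟨0, d, by simp, h⟩

-- divisor enumeration from a factorization is sound and complete
theorem divs_mem_iff (L : List (Nat × Nat)) (hpr : ∀ pe ∈ L, Nat.Prime pe.1)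
    (hne : L.Pairwise (fun a b => a.1 ≠ b.1)) (d : Nat) :
    d ∈ L.foldl divsStep [1] ↔ d ∣ prodFac L := by
  induction L using List.reverseRecOn generalizing d with
  | nil => simp [prodFac, Nat.dvd_one]
  | append_singleton L x ihL =>
      obtain ⟨hprL, hpx⟩ : (∀ pe ∈ L, Nat.Prime pe.1) ∧ Nat.Prime x.1 := by
        constructor
        · exact fun pe hpe => hpr pe (List.mem_append_left _ hpe)
        · exact hpr x (List.mem_append_right _ (List.mem_singleton_self x))
      have hxneL : ∀ a ∈ L, a.1 ≠ x.1 := by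
        have := (List.pairwise_append.mp hne).2.2
        intro a ha
        exact this a ha x (List.mem_singleton_self x)
      have hneL : L.Pairwise (fun a b => a.1 ≠ b.1) := (List.pairwise_append.mp hne).1
      have ih := ihL hprL hneL
      have hNpos : 0 < prodFac L := by
        apply List.prod_pos
        intro a ha
        obtain ⟨pe, hpe, rfl⟩ := List.mem_map.mp ha
        exact pow_pos (hprL pe hpe).pos _
      have hpN : ¬ x.1 ∣ prodFac L := by
        intro hdvd
        obtain ⟨a, ha, hda⟩ := (hpx.prime.dvd_prod_iff).mp hdvd
        obtain ⟨pe, hpe, rfl⟩ := List.mem_map.mp ha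
        have := hpx.dvd_of_dvd_pow hda
        exact hxneL pe hpe ((Nat.prime_dvd_prime_iff_eq hpx (hprL pe hpe)).mp this).symm
      have hfold : (L ++ [x]).foldl divsStep [1] = divsStep (L.foldl divsStep [1]) x := by
        rw [List.foldl_append, List.foldl_cons, List.foldl_nil]
      have hprodapp : prodFac (L ++ [x]) = prodFac L * x.1 ^ x.2 := by
        simp [prodFac]
      rw [hfold, hprodapp]
      constructor
      · intro hd
        obtain ⟨d1, hd1, hk⟩ := List.mem_flatMap.mp hd
        obtain ⟨k, hkmem, rfl⟩ := List.mem_map.mp hk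
        have hkle : k ≤ x.2 := by
          have := List.mem_range.mp hkmem; omega
        exact mul_dvd_mul ((ih _).mp hd1) (pow_dvd_pow _ hkle)
      · intro hd
        have hd0 : 0 < d := Nat.pos_of_dvd_of_pos hd (Nat.mul_pos hNpos (pow_pos hpx.pos _))
        obtain ⟨k, d1, rfl, hnd1⟩ := exists_pow_mul_not_dvd x.1 hpx.two_le d hd0
        have hcopr1 : Nat.Coprime d1 x.1 := ((Nat.Prime.coprime_iff_not_dvd hpx).mpr hnd1).symm
        have hd1N : d1 ∣ prodFac L := by
          refine (hcopr1.pow_right x.2).dvd_of_dvd_mul_right ?_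
          exact dvd_trans (Dvd.intro_left _ rfl) hd
        have hkx : k ≤ x.2 := by
          have hpk : x.1 ^ k ∣ prodFac L * x.1 ^ x.2 := dvd_trans (Dvd.intro _ rfl) hd
          have hcoprN : Nat.Coprime (x.1 ^ k) (prodFac L) :=
            Nat.Coprime.pow_left k ((Nat.Prime.coprime_iff_not_dvd hpx).mpr hpN)
          have := hcoprN.dvd_of_dvd_mul_left hpk
          exact (Nat.pow_dvd_pow_iff_le_right hpx.one_lt).mp this
        refine List.mem_flatMap.mpr ⟨d1, (ih _).mpr hd1N, ?_⟩
        refine List.mem_map.mpr ⟨k, List.mem_range.mpr (by omega), ?_⟩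
        exact (mul_comm _ _)

theorem best_rectangle_spec : Claim_equal_best_rectangle := by
  intro n _ hpre
  have h1n : (1 : Int) ≤ n := hpre
  have hn : ¬ n ≤ 0 := by omega
  simp only [Spec_best_rectangle, best_rectangle, best_rectangle_alt, if_neg hn]
  have hnn1 : 1 ≤ n.toNat := by omega
  obtain ⟨hprod, hmem, hpw, hmf⟩ := factorLoop_spec n.toNat 2 (by omega) le_rfl (by omega)
  set L := (if (factorLoop n.toNat 2).2 > 1
      then (factorLoop n.toNat 2).1 ++ [((factorLoop n.toNat 2).2, 1)]
      else (factorLoop n.toNat 2).1) with hLdef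
  have hLprod : prodFac L = n.toNat ∧ (∀ pe ∈ L, Nat.Prime pe.1) ∧
      L.Pairwise (fun a b => a.1 ≠ b.1) := by
    by_cases h1 : (factorLoop n.toNat 2).2 > 1
    · rcases hmf with h | ⟨hpr, hlt⟩
      · omega
      · rw [hLdef, if_pos h1]
        refine ⟨?_, ?_, ?_⟩
        · rw [show prodFac ((factorLoop n.toNat 2).1 ++ [((factorLoop n.toNat 2).2, 1)])
              = prodFac (factorLoop n.toNat 2).1 * (factorLoop n.toNat 2).2 ^ 1 by
            simp [prodFac], pow_one, hprod]
        · intro pe hpe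
          rcases List.mem_append.mp hpe with hpe | hpe
          · exact (hmem pe hpe).1
          · rw [List.mem_singleton.mp hpe]; exact hpr
        · rw [List.pairwise_append]
          refine ⟨hpw.imp (fun h => Nat.ne_of_lt h), List.pairwise_singleton _ _, ?_⟩
          intro a ha b hb
          rw [List.mem_singleton.mp hb]
          exact Nat.ne_of_lt (hlt a ha)
    · have hmf1 : (factorLoop n.toNat 2).2 = 1 := by
        rcases hmf with h | ⟨hpr, -⟩
        · exact h
        · exact absurd hpr.two_le (by omega)
      rw [hLdef, if_neg h1]
      rw [hmf1, mul_one] at hprod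
      exact ⟨hprod, fun pe hpe => (hmem pe hpe).1, hpw.imp (fun h => Nat.ne_of_lt h)⟩
  obtain ⟨hLp, hLpr, hLne⟩ := hLprod
  have hdiv_iff : ∀ d, d ∈ List.foldl divsStep [1] L ↔ d ∣ n.toNat := by
    intro d
    rw [divs_mem_iff L hLpr hLne, hLp]
  have hroot1 : 1 ≤ n.toNat.sqrt := Nat.sqrt_pos.mpr (by omega)
  have h1mem : 1 ∈ List.filter (fun d => decide (d ≤ n.toNat.sqrt)) (List.foldl divsStep [1] L) :=
    List.mem_filter.mpr ⟨(hdiv_iff 1).mpr (one_dvd _), decide_eq_true hroot1⟩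
  have hbest_ge : ∀ y ∈ List.filter (fun d => decide (d ≤ n.toNat.sqrt)) (List.foldl divsStep [1] L),
      y ≤ List.foldl max 0 (List.filter (fun d => decide (d ≤ n.toNat.sqrt)) (List.foldl divsStep [1] L)) :=
    (PySem.List.le_foldl_max _ 0).2
  have h1le : 1 ≤ List.foldl max 0 (List.filter (fun d => decide (d ≤ n.toNat.sqrt)) (List.foldl divsStep [1] L)) :=
    hbest_ge 1 h1mem
  have hbestmem : List.foldl max 0 (List.filter (fun d => decide (d ≤ n.toNat.sqrt)) (List.foldl divsStep [1] L))
      ∈ List.filter (fun d => decide (d ≤ n.toNat.sqrt)) (List.foldl divsStep [1] L) := by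
    rcases PySem.List.foldl_max_mem (List.filter (fun d => decide (d ≤ n.toNat.sqrt)) (List.foldl divsStep [1] L)) 0 with h | h
    · omega
    · exact h
  obtain ⟨hbin, hble⟩ := List.mem_filter.mp hbestmem
  exact bestRectDown_eq n (by omega) n.toNat.sqrt _ h1le (of_decide_eq_true hble)
    ((hdiv_iff _).mp hbin)
    (fun c hc hcr => hbest_ge c (List.mem_filter.mpr ⟨(hdiv_iff c).mpr hc, decide_eq_true hcr⟩))
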